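-- pv_equiv track=rewrite | github.com/Blackbird081/Controlled-Vibe-Framework-CVF | scripts/export_cvf_governance_state_registry.py | _pick_latest_uat
-- ===== SOURCE A (Python) =====
-- def _pick_latest_uat(entries: list[dict[str, str]], agent_id: str) -> dict[str, str] | None:
--     matching = [entry for entry in entries if entry.get("agentId", "").strip().upper() == agent_id.strip().upper()]
--     if not matching:
--         return None
--     matching.sort(key=lambda item: item.get("lastRunAt", ""), reverse=True)
--     latest = matching[0]
--     return {
--         "status": latest.get("status", "NOT_TESTED"),
--         "lastRunAt": latest.get("lastRunAt", ""),
--     }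
-- ===== SOURCE B (Python) =====
-- def _pick_latest_uat(entries: list[dict[str, str]], agent_id: str) -> dict[str, str] | None:
--     target = agent_id.strip().upper()
--     best = None
--     for entry in entries:
--         if entry.get("agentId", "").strip().upper() == target:
--             if best is None or best.get("lastRunAt", "") < entry.get("lastRunAt", ""):
--                 best = entry
--     if best is None:
--         return None
--     return {
--         "status": best.get("status", "NOT_TESTED"),
--         "lastRunAt": best.get("lastRunAt", ""),
--     }
-- ===== Notes on version B (the rewrite author's own statement) =====
-- stated objective: faster
-- what changed: Replaces filter + stable reverse sort + head with a single linear pass keeping the current best entry (strict '<' so the first occurrence wins ties), building no intermediate list.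
import Mathlib
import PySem

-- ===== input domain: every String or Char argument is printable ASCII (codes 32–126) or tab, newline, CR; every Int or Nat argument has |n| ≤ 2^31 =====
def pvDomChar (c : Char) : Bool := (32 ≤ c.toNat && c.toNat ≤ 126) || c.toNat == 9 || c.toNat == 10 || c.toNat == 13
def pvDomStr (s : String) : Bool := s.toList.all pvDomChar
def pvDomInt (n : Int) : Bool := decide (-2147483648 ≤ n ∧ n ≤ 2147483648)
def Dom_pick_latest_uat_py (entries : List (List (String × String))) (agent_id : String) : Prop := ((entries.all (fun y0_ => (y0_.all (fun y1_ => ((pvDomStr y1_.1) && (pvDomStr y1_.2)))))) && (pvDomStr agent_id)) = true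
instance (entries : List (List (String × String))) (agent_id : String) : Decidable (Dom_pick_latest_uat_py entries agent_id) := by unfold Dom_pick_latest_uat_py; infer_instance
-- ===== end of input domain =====

-- B replaces filter + stable reverse sort + head by a single strict-max scan over the entries (no intermediate list, no sort).

-- shared Python-dict helpers (a .get with a default, used verbatim by both Pythons)
def pvGet (entry : List (String × String)) (k dflt : String) : String :=
  (PySem.Dict.mk entry).getD k dflt

def pvAgentKey (entry : List (String × String)) : String :=
  PySem.Str.upper (PySem.Str.strip (pvGet entry "agentId" ""))

def pvRunKey (entry : List (String × String)) : String :=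
  pvGet entry "lastRunAt" ""

def pvOut (latest : List (String × String)) : List (String × String) :=
  [("status", pvGet latest "status" "NOT_TESTED"), ("lastRunAt", pvRunKey latest)]

-- ===== PORT A =====
def pick_latest_uat_py (entries : List (List (String × String))) (agent_id : String) : Option (List (String × String)) :=
  let matching := entries.filter (fun entry => pvAgentKey entry == PySem.Str.upper (PySem.Str.strip agent_id))
  if matching.isEmpty then none
  else
    match PySem.List.sorted matching pvRunKey true with
    | [] => none  -- unreachable: matching is nonempty
    | latest :: _ => some (pvOut latest)

-- ===== PORT B =====
-- the body of B's loop: keep the current best match, replaced only on a strictly later lastRunAt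
def pvStep (best : Option (List (String × String))) (entry : List (String × String)) : Option (List (String × String)) :=
  match best with
  | none => some entry
  | some b => if pvRunKey b < pvRunKey entry then some entry else some b

def pick_latest_uat_py_alt (entries : List (List (String × String))) (agent_id : String) : Option (List (String × String)) :=
  let target := PySem.Str.upper (PySem.Str.strip agent_id)
  let best := entries.foldl (fun best entry => if pvAgentKey entry == target then pvStep best entry else best) none
  best.map pvOut

-- ===== PRECONDITION & SPEC =====
def Spec_pick_latest_uat_py (entries : List (List (String × String))) (agent_id : String) (out : Option (List (String × String))) : Prop := out = pick_latest_uat_py_alt entries agent_id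
instance (entries : List (List (String × String))) (agent_id : String) (out : Option (List (String × String))) : Decidable (Spec_pick_latest_uat_py entries agent_id out) := by unfold Spec_pick_latest_uat_py; infer_instance

-- ===== CLAIM (what is proved, stated in full; the proofs are below) =====
def Claim_equal_pick_latest_uat_py : Prop := ∀ (entries : List (List (String × String))) (agent_id : String), Dom_pick_latest_uat_py entries agent_id → Spec_pick_latest_uat_py entries agent_id (pick_latest_uat_py entries agent_id)

-- ===== LEMMAS AND PROOFS =====

-- inserting into a reverse-sorted accumulator changes the head exactly as one strict-max step does
theorem head?_insertBy (x : List (String × String)) (acc : List (List (String × String))) :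
    (PySem.List.insertBy (fun a b => decide (pvRunKey b < pvRunKey a)) x acc).head? =
      pvStep acc.head? x := by
  cases acc with
  | nil => rfl
  | cons y ys =>
      simp only [PySem.List.insertBy, List.head?_cons, pvStep]
      split_ifs with h <;> simp_all

-- the head of the insertBy fold is the strict-max scan of the same list
theorem head?_foldl_insertBy (l : List (List (String × String))) (acc : List (List (String × String))) :
    (l.foldl (fun acc x => PySem.List.insertBy (fun a b => decide (pvRunKey b < pvRunKey a)) x acc) acc).head? =
      l.foldl pvStep acc.head? := by
  induction l generalizing acc with
  | nil => rfl
  | cons x t ih =>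
      simp only [List.foldl_cons]
      rw [ih, head?_insertBy]

-- head of the stable reverse sort = first occurrence of the maximal key = the strict-max scan
theorem head?_sorted_rev (l : List (List (String × String))) :
    (PySem.List.sorted l pvRunKey true).head? = l.foldl pvStep none := by
  rw [PySem.List.sorted_rev_eq_foldl_insertBy]
  exact head?_foldl_insertBy l []

-- A's filter/sort/head pipeline agrees with the strict-max scan of the same matching list
theorem pv_core (matching : List (List (String × String))) :
    (if matching.isEmpty then none
     else
       match PySem.List.sorted matching pvRunKey true with
       | [] => none
       | latest :: _ => some (pvOut latest)) =
      Option.map pvOut (matching.foldl pvStep none) := by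
  have hh := head?_sorted_rev matching
  cases hsm : PySem.List.sorted matching pvRunKey true with
  | nil =>
      have h0 : matching = [] := (PySem.List.sorted_eq_nil_iff matching pvRunKey true).mp hsm
      simp [h0]
  | cons latest rest =>
      have hne : ¬ matching.isEmpty := by
        intro h
        rw [List.isEmpty_iff.mp h] at hsm
        simp [PySem.List.sorted] at hsm
      rw [hsm] at hh
      simp [hne, ← hh]

-- ===== VERDICT (by name: the statement is the Claim_ definition above) =====
theorem pick_latest_uat_py_spec : Claim_equal_pick_latest_uat_py := by
  intro entries agent_id _
  unfold Spec_pick_latest_uat_py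
  simp only [pick_latest_uat_py, pick_latest_uat_py_alt]
  rw [← List.foldl_filter]
  exact pv_core _
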